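-- pv_equiv track=rewrite | github.com/UlugbekMuslitdinov/CSC120 | street.py | has_building
-- ===== SOURCE A (Python) =====
-- def has_building(obj):
--     """
--     This function checks if the street map has a building
--
--     Parameters:
--         obj (list): list of objects
--
--     Returns:
--         bool: True if the street map has a building, False otherwise
--
--     Pre-conditions:
--         obj is a list
--
--     Post-conditions:
--         returns True if the street map has a building, False otherwise
--     """
--     if len(obj) == 0:
--         return False
--     else:
--         current_object = obj[0].split(":")
--         if current_object[0] == "b":
--             return True
--         else:
--             return has_building(obj[1:])
-- ===== SOURCE B (Python) =====
-- def has_building(obj):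
--     for o in obj:
--         if o.split(":")[0] == "b":
--             return True
--     return False
-- ===== Notes on version B (the rewrite author's own statement) =====
-- stated objective: faster
-- what changed: Replaced the recursion over tail slices (each call copies obj[1:], O(n^2) total, and deep lists hit the recursion limit) with a single iterative for-loop with early return.
import Mathlib
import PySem

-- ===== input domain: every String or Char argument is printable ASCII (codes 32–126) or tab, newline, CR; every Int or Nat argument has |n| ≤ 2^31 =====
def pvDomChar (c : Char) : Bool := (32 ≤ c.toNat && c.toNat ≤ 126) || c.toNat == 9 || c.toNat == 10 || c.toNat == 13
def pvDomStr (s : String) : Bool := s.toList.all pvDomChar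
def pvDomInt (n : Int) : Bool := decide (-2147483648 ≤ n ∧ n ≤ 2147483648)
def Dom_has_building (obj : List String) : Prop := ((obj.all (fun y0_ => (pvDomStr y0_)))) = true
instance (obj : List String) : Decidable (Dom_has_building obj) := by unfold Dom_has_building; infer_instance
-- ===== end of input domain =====

-- B replaces A's recursion over tail slices with a single iterative pass (early return); return value unchanged.

-- ===== PORT A =====
-- A: recursion on obj[1:]; split? with sep ":" ≠ "" is always some, and the split list is nonempty, so current_object[0] is its head.
def has_building (obj : List String) : Bool :=
  match obj with
  | [] => false
  | o :: rest =>
    let current_object := (PySem.Str.split? o ":").getD []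
    if current_object.headD "" == "b" then true
    else has_building rest

-- ===== PORT B =====
-- B: linear loop with early return, ported as List.any.
def has_building_alt (obj : List String) : Bool :=
  obj.any (fun o => ((PySem.Str.split? o ":").getD []).headD "" == "b")

-- ===== PRECONDITION & SPEC =====
def Spec_has_building (obj : List String) (out : Bool) : Prop := out = has_building_alt obj
instance (obj : List String) (out : Bool) : Decidable (Spec_has_building obj out) := by unfold Spec_has_building; infer_instance

-- ===== CLAIM (what is proved, stated in full; the proofs are below) =====
def Claim_equal_has_building : Prop := ∀ (obj : List String), Dom_has_building obj → Spec_has_building obj (has_building obj)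

-- ===== LEMMAS AND PROOFS =====
theorem has_building_eq_alt (obj : List String) : has_building obj = has_building_alt obj := by
  induction obj with
  | nil => rfl
  | cons o rest ih =>
    simp [has_building, has_building_alt, beq_eq_decide, ih]

-- ===== VERDICT (by name: the statement is the Claim_ definition above) =====
theorem has_building_spec : Claim_equal_has_building := by
  intro obj _
  exact has_building_eq_alt obj
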